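-- pv_equiv track=rewrite | github.com/ChristianOkokhere/CFGrind | python/splitarraylargestsum.py | work
-- ===== SOURCE A (Python) =====
-- def work(nums, k):
--     l,r = max(nums), sum(nums)
--
--     while l < r:
--         mid = l + (r-l) // 2
--
--         if canSplit(nums, k, mid):
--             #we need to look in the other direction
--             r = mid
--         else:
--             l = mid + 1
--     return l
--
-- def canSplit(nums, k, mid):
--     part = 1 # I think this has to start at one
--     curs = 0 #this is because we want to control when to change it
--     for i in range(len(nums)):
--
--         #if adding in the thing will put us over edge
--         if curs + nums[i] > mid:
--             curs = nums[i]
--             part += 1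
--         #if we can fit the numer in just do dat lamo
--         else:
--             curs += nums[i]
--     return part <= k
-- ===== SOURCE B (Python) =====
-- def work(nums, k):
--     lo = max(nums)
--     hi = sum(nums)
--     pre = []
--     total = 0
--     for x in nums:
--         total += x
--         pre.append(total)
--
--     def feasible(cap):
--         cuts = 0
--         base = 0
--         prev = 0
--         for p in pre:
--             if p - base > cap:
--                 cuts += 1
--                 if cuts >= k:
--                     return False
--                 base = prev
--             prev = p
--         return cuts < k
--
--     def search(lo, hi):
--         if lo >= hi:
--             return lo
--         mid = (lo + hi) // 2
--         return search(lo, mid) if feasible(mid) else search(mid + 1, hi)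
--
--     return search(lo, hi)
-- ===== Notes on version B (the rewrite author's own statement) =====
-- stated objective: alternative
-- what changed: The iterative while-loop binary search with a per-probe greedy re-scan of the raw elements is replaced by a recursive bisection over prefix sums computed once, whose feasibility scan compares prefix differences against a moving base and exits early as soon as the part budget is exhausted (the probe sequence must stay identical because the greedy predicate is not monotone on inputs with negative elements).
-- outside the precondition, e.g. on work([], 3): A raises ValueError, B raises ValueError
import Mathlib
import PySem

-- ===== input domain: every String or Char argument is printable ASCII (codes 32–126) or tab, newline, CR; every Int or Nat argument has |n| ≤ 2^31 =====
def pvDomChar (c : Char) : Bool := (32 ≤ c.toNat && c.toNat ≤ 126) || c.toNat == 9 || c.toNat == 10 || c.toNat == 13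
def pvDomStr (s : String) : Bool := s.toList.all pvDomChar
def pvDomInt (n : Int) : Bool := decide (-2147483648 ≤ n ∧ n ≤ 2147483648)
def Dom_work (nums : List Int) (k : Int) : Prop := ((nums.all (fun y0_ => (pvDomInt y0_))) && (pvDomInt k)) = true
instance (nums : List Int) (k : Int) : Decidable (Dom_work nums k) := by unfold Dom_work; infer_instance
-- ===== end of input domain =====

-- B replaces the iterative while-loop + per-probe greedy over raw elements by a recursive
-- bisection over once-computed prefix sums with an early-exiting feasibility scan (same cost;
-- the probe sequence is kept identical because the greedy predicate is not monotone with
-- negative elements). Pre_ excludes only the empty list, on which A raises ValueError (max([])).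


-- ===== PORT A =====
def canSplit (nums : List Int) (k : Int) (mid : Int) : Bool :=
  -- part = 1, curs = 0; for x in nums: if curs + x > mid: curs = x; part += 1 else curs += x
  let st := nums.foldl
    (fun (pc : Int × Int) x => if pc.2 + x > mid then (pc.1 + 1, x) else (pc.1, pc.2 + x))
    (1, 0)
  decide (st.1 ≤ k)

-- the 'while l < r' loop; fuel = (r - l).toNat + 1 at the call site makes the same computation total
def workLoop (nums : List Int) (k : Int) : Nat → Int → Int → Int
  | 0, l, _ => l
  | fuel + 1, l, r =>
    if l < r then
      let mid := l + PySem.Int.floordiv (r - l) 2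
      if canSplit nums k mid then workLoop nums k fuel l mid
      else workLoop nums k fuel (mid + 1) r
    else l

def work (nums : List Int) (k : Int) : Int :=
  let l := (PySem.List.max? nums (fun y => y)).getD 0   -- max(nums); ValueError on [] excluded by Pre_
  let r := nums.sum
  workLoop nums k ((r - l).toNat + 1) l r

-- ===== PORT B =====
def buildPre (total : Int) : List Int → List Int
  | [] => []
  | x :: xs => (total + x) :: buildPre (total + x) xs

def feasible (k : Int) (cap : Int) : Int → Int → Int → List Int → Bool
  | cuts, _base, _prev, [] => decide (cuts < k)
  | cuts, base, prev, p :: ps =>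
    if p - base > cap then
      if cuts + 1 ≥ k then false
      else feasible k cap (cuts + 1) prev p ps
    else feasible k cap cuts base p ps

-- recursive bisection; fuel = (hi - lo).toNat + 1 at the call site makes the same recursion total
def searchAlt (pre : List Int) (k : Int) : Nat → Int → Int → Int
  | 0, lo, _ => lo
  | fuel + 1, lo, hi =>
    if lo < hi then
      let mid := PySem.Int.floordiv (lo + hi) 2
      if feasible k mid 0 0 0 pre then searchAlt pre k fuel lo mid
      else searchAlt pre k fuel (mid + 1) hi
    else lo

def work_alt (nums : List Int) (k : Int) : Int :=
  let lo := (PySem.List.max? nums (fun y => y)).getD 0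
  let hi := nums.sum
  searchAlt (buildPre 0 nums) k ((hi - lo).toNat + 1) lo hi

-- ===== PRECONDITION & SPEC =====
-- Pre_ excludes exactly the empty list, on which A raises ValueError (max of empty sequence).
def Pre_work (nums : List Int) (k : Int) : Prop := nums ≠ []
instance (nums : List Int) (k : Int) : Decidable (Pre_work nums k) := by unfold Pre_work; infer_instance
def pvWitness_work : List Int × Int := ([1, 2, 3], 2)

def Spec_work (nums : List Int) (k : Int) (out : Int) : Prop := out = work_alt nums k
instance (nums : List Int) (k : Int) (out : Int) : Decidable (Spec_work nums k out) := by unfold Spec_work; infer_instance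

-- ===== CLAIM (what is proved, stated in full; the proofs are below) =====
def Claim_equal_work : Prop := ∀ (nums : List Int) (k : Int), Dom_work nums k → Pre_work nums k → Spec_work nums k (work nums k)

-- ===== LEMMAS AND PROOFS =====

-- the part counter of A's greedy fold never decreases
theorem part_mono (mid : Int) : ∀ (xs : List Int) (p c : Int),
    p ≤ (xs.foldl (fun (pc : Int × Int) x => if pc.2 + x > mid then (pc.1 + 1, x) else (pc.1, pc.2 + x)) (p, c)).1 := by
  intro xs
  induction xs with
  | nil => intro p c; simp
  | cons x xs ih =>
    intro p c
    simp only [List.foldl]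
    by_cases h : c + x > mid
    · rw [if_pos h]; exact le_trans (by omega) (ih (p + 1) x)
    · rw [if_neg h]; exact ih p (c + x)

-- B's early-exiting prefix-sum scan computes exactly A's greedy part test
theorem feasible_eq (k cap : Int) : ∀ (xs : List Int) (cuts base prev : Int),
    feasible k cap cuts base prev (buildPre prev xs)
      = decide ((xs.foldl (fun (pc : Int × Int) x => if pc.2 + x > cap then (pc.1 + 1, x) else (pc.1, pc.2 + x)) (cuts + 1, prev - base)).1 ≤ k) := by
  intro xs
  induction xs with
  | nil =>
    intro cuts base prev
    simp only [buildPre, feasible, List.foldl]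
    exact decide_eq_decide.mpr (by omega)
  | cons x xs ih =>
    intro cuts base prev
    simp only [buildPre, feasible, List.foldl]
    by_cases h : prev + x - base > cap
    · rw [if_pos h, if_pos (show prev - base + x > cap by omega)]
      by_cases hk : cuts + 1 ≥ k
      · rw [if_pos hk]
        have hm := part_mono cap xs (cuts + 1 + 1) x
        exact (decide_eq_false (by omega)).symm
      · rw [if_neg hk]
        have := ih (cuts + 1) prev (prev + x)
        rw [show prev + x - prev = x by ring] at this
        exact this
    · rw [if_neg h, if_neg (show ¬(prev - base + x > cap) by omega)]
      have := ih cuts base (prev + x)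
      rw [show prev + x - base = prev - base + x by ring] at this
      exact this

theorem canSplit_eq (nums : List Int) (k mid : Int) :
    canSplit nums k mid = feasible k mid 0 0 0 (buildPre 0 nums) := by
  rw [feasible_eq]
  simp only [canSplit]
  norm_num

-- with the same fuel the two bisections probe the same midpoints and agree
theorem search_eq (nums : List Int) (k : Int) : ∀ (fuel : Nat) (l r : Int),
    workLoop nums k fuel l r = searchAlt (buildPre 0 nums) k fuel l r := by
  intro fuel
  induction fuel with
  | zero => intro l r; rfl
  | succ fuel ih =>
    intro l r
    simp only [workLoop, searchAlt]
    by_cases hlr : l < r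
    · rw [if_pos hlr, if_pos hlr]
      have h2 : (0:Int) < 2 := by norm_num
      have hmid : l + PySem.Int.floordiv (r - l) 2 = PySem.Int.floordiv (l + r) 2 := by
        rw [PySem.Int.floordiv_eq_ediv_of_pos h2, PySem.Int.floordiv_eq_ediv_of_pos h2]
        omega
      simp only [← hmid, canSplit_eq]
      by_cases hc : feasible k (l + PySem.Int.floordiv (r - l) 2) 0 0 0 (buildPre 0 nums)
      · rw [if_pos hc, if_pos hc]; exact ih l _
      · rw [if_neg hc, if_neg hc]; exact ih _ r
    · rw [if_neg hlr, if_neg hlr]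

-- ===== VERDICT (by name: the statement is the Claim_ definition above) =====
theorem work_spec : Claim_equal_work := by
  intro nums k _hdom _hpre
  unfold Spec_work work work_alt
  exact search_eq nums k _ _ _
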